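-- pv_equiv track=rewrite | github.com/johnsolk/ljcohen.github.io_old | _site/_site/analyses/Dasen/scripts/dasen_files2.py | merged_files_dictionary
-- ===== SOURCE A (Python) =====
-- def get_base_filename(fastq_file):
--     base_filename=fastq_file[-24:-19]
--     return base_filename
--
-- def merged_files_dictionary(merged_file_list):
--     sample_dict={}
--     for filename in merged_file_list:
--         sample=get_base_filename(filename)
--         if sample in sample_dict.keys():
--             sample_dict[sample].append(filename)
--         else:
--             sample_dict[sample]=[filename]
--     return sample_dict
-- ===== SOURCE B (Python) =====
-- def get_base_filename(fastq_file):
--     base_filename=fastq_file[-24:-19]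
--     return base_filename
--
-- def merged_files_dictionary(merged_file_list):
--     keys = list(dict.fromkeys(map(get_base_filename, merged_file_list)))
--     return {k: [f for f in merged_file_list if get_base_filename(f) == k]
--             for k in keys}
-- ===== Notes on version B (the rewrite author's own statement) =====
-- stated objective: alternative
-- what changed: Replaces A's single-pass incremental dict build (membership test, then append-or-insert per element) with a two-pass scheme: dedup the base-filename keys once in first-occurrence order, then build each group by filtering the whole list per key.
import Mathlib
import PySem

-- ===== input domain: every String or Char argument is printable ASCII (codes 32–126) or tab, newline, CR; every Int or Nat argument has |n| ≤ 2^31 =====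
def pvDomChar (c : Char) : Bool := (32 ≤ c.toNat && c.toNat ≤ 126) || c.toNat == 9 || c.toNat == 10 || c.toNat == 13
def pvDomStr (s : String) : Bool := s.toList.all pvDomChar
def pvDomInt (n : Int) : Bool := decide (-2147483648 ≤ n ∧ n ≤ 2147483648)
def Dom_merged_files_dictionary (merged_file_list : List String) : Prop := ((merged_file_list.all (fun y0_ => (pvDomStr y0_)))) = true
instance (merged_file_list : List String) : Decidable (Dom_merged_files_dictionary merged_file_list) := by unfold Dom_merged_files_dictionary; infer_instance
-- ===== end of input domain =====

-- B replaces A's incremental dict-building loop by a two-pass form: dedup the base keys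
-- once, then collect each group with a per-key filter (objective: alternative, same results).

-- ===== PORT A =====
def get_base_filename (fastq_file : String) : String :=
  PySem.Str.slice fastq_file (some (-24)) (some (-19))

def merged_files_dictionary (merged_file_list : List String) : List (String × List String) :=
  (merged_file_list.foldl
    (fun (sample_dict : PySem.Dict String (List String)) filename =>
      let sample := get_base_filename filename
      if sample_dict.contains sample then
        sample_dict.modify sample [] (fun xs => xs ++ [filename])
      else
        sample_dict.insert sample [filename])
    PySem.Dict.empty).items

-- ===== PORT B =====
def merged_files_dictionary_alt (merged_file_list : List String) : List (String × List String) :=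
  let keys := PySem.List.dedup (merged_file_list.map get_base_filename)
  keys.map (fun k => (k, merged_file_list.filter (fun f => get_base_filename f == k)))

-- ===== PRECONDITION & SPEC =====
def Spec_merged_files_dictionary (merged_file_list : List String) (out : List (String × List String)) : Prop := out = merged_files_dictionary_alt merged_file_list
instance (merged_file_list : List String) (out : List (String × List String)) : Decidable (Spec_merged_files_dictionary merged_file_list out) := by unfold Spec_merged_files_dictionary; infer_instance

-- ===== CLAIM (what is proved, stated in full; the proofs are below) =====
def Claim_equal_merged_files_dictionary : Prop := ∀ (merged_file_list : List String), Dom_merged_files_dictionary merged_file_list → Spec_merged_files_dictionary merged_file_list (merged_files_dictionary merged_file_list)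

-- ===== LEMMAS AND PROOFS =====

-- A's loop body equals an unconditional `modify` (in the absent-key case `getD` is `[]`).
theorem stepA_eq_modify (d : PySem.Dict String (List String)) (f : String) :
    (let sample := get_base_filename f
      if d.contains sample then d.modify sample [] (fun xs => xs ++ [f])
      else d.insert sample [f]) =
    d.modify (get_base_filename f) [] (fun xs => xs ++ [f]) := by
  by_cases h : d.contains (get_base_filename f)
  · simp [h]
  · simp only [h, Bool.false_eq_true, if_false]
    simp [PySem.Dict.modify, PySem.Dict.getD_of_not_contains _ _ (by simpa using h)]

-- The items of a nodup-key dict are its keys paired with their values.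
theorem items_eq_keys_map (d : PySem.Dict String (List String)) (h : d.keys.Nodup) :
    d.items = d.keys.map (fun k => (k, d.getD k [])) := by
  have : d.keys.map (fun k => (k, d.getD k [])) = d.items.map (fun p => (p.1, d.getD p.1 [])) := by
    simp only [PySem.Dict.keys, List.map_map]; rfl
  rw [this]
  have : ∀ p ∈ d.items, (p.1, d.getD p.1 []) = p := by
    intro p hp
    have := PySem.Dict.getD_of_mem_items d (k := p.1) (v := p.2) (by simpa using hp) h []
    simp [this]
  rw [List.map_congr_left this]; simp

theorem foldA_eq (l : List String) (d : PySem.Dict String (List String)) :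
    l.foldl
      (fun (d : PySem.Dict String (List String)) filename =>
        let sample := get_base_filename filename
        if d.contains sample then d.modify sample [] (fun xs => xs ++ [filename])
        else d.insert sample [filename])
      d
    = l.foldl (fun d f => d.modify (get_base_filename f) [] (fun xs => xs ++ [f])) d := by
  simp only [stepA_eq_modify]

-- ===== VERDICT (by name: the statement is the Claim_ definition above) =====
theorem merged_files_dictionary_spec : Claim_equal_merged_files_dictionary := by
  intro l _
  unfold Spec_merged_files_dictionary merged_files_dictionary merged_files_dictionary_alt
  rw [foldA_eq]
  set d := l.foldl (fun d f => d.modify (get_base_filename f) [] (fun xs => xs ++ [f]))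
    PySem.Dict.empty with hd
  have hkeys : d.keys = PySem.List.dedup (l.map get_base_filename) := by
    rw [hd, PySem.Dict.keys_foldl_modify_key l get_base_filename [] (fun _ f xs => xs ++ [f])]
    simp [PySem.Set.update_nil_left]
  have hget : ∀ c, d.getD c [] = l.filter (fun f => get_base_filename f == c) := by
    intro c
    rw [hd]
    have : l.foldl (fun d f => d.modify (get_base_filename f) [] (fun xs => xs ++ [f]))
        PySem.Dict.empty
      = (l.map (fun f => (get_base_filename f, f))).foldl
          (fun d p => d.modify p.1 [] (fun xs => xs ++ [p.2])) PySem.Dict.empty := by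
      rw [List.foldl_map]
    rw [this, PySem.Dict.getD_foldl_modify_append]
    simp [List.filter_map, Function.comp_def]
  have hnodup : d.keys.Nodup := by rw [hkeys]; exact PySem.List.nodup_dedup _
  rw [items_eq_keys_map d hnodup, hkeys]
  apply List.map_congr_left
  intro k _
  simp [hget k]
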